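-- pv_equiv track=rewrite | github.com/airthos/print-farm | farm_loop.py | strip_end_gcode
-- ===== SOURCE A (Python) =====
-- def strip_end_gcode(lines):
--     """
--     Find the stock end gcode boundary and cut there.
--     Returns (kept_lines, cut_line_number or None).
--     """
--     for i in range(len(lines) - 1, -1, -1):
--         if "; MACHINE_END_GCODE_START" in lines[i]:
--             cut = i - 1 if i > 0 and "; FEATURE: Custom" in lines[i - 1] else i
--             return lines[:cut], cut
--     for i in range(len(lines) - 1, -1, -1):
--         if lines[i].strip().lower().startswith("m400") and "wait for buffer" in lines[i].lower():
--             return lines[:i], i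
--     return lines, None
-- ===== SOURCE B (Python) =====
-- def strip_end_gcode(lines):
--     """
--     Single backward pass: return immediately at the machine-end marker;
--     remember the highest m400/wait-for-buffer line as a fallback.
--     """
--     m400 = None
--     for i in range(len(lines) - 1, -1, -1):
--         line = lines[i]
--         if "; MACHINE_END_GCODE_START" in line:
--             cut = i - 1 if i > 0 and "; FEATURE: Custom" in lines[i - 1] else i
--             return lines[:cut], cut
--         if m400 is None and line.strip().lower().startswith("m400") and "wait for buffer" in line.lower():
--             m400 = i
--     if m400 is not None:
--         return lines[:m400], m400
--     return lines, None
-- ===== Notes on version B (the rewrite author's own statement) =====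
-- stated objective: alternative
-- what changed: Replaces A's two separate backward scans with one backward pass that returns at the machine-end marker and records the m400/wait-for-buffer fallback index on the way.
import Mathlib
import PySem

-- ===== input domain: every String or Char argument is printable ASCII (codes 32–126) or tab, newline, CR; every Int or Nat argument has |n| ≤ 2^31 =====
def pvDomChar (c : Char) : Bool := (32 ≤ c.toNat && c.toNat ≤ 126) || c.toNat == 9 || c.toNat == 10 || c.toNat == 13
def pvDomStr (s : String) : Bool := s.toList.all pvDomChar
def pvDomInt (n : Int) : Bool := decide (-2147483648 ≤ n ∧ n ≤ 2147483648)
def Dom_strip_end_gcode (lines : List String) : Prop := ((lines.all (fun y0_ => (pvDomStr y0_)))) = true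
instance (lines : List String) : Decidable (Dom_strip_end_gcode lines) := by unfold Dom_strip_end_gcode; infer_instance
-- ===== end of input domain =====

-- B replaces A's two backward scans by one backward pass that records the m400 fallback index; same return value everywhere.

-- ===== PORT A =====
-- A's first backward loop: indices n-1, …, 0; returns at the machine-end marker.
def pvLoopA1 (lines : List String) : Nat → Option (List String × Option Int)
  | 0 => none
  | n + 1 =>
    let line := lines.getD n ""   -- lines[i], i = n always in range
    if PySem.Str.isIn "; MACHINE_END_GCODE_START" line then
      let cut : Nat := if decide (0 < n) && PySem.Str.isIn "; FEATURE: Custom" (lines.getD (n - 1) "") then n - 1 else n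
      some (lines.take cut, some (cut : Int))   -- lines[:cut] with 0 ≤ cut = take
    else pvLoopA1 lines n

-- A's second backward loop: the m400 / wait-for-buffer fallback.
def pvLoopA2 (lines : List String) : Nat → Option (List String × Option Int)
  | 0 => none
  | n + 1 =>
    let line := lines.getD n ""
    if PySem.Str.startswith (PySem.Str.lower (PySem.Str.strip line)) "m400" &&
       PySem.Str.isIn "wait for buffer" (PySem.Str.lower line) then
      some (lines.take n, some (n : Int))
    else pvLoopA2 lines n

def strip_end_gcode (lines : List String) : List String × Option Int :=
  match pvLoopA1 lines lines.length with
  | some r => r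
  | none =>
    match pvLoopA2 lines lines.length with
    | some r => r
    | none => (lines, none)

-- ===== PORT B =====
-- B's single backward pass, carrying the recorded m400 fallback index.
def pvLoopB (lines : List String) : Nat → Option Nat → List String × Option Int
  | 0, m400 =>
    match m400 with
    | some j => (lines.take j, some (j : Int))
    | none => (lines, none)
  | n + 1, m400 =>
    let line := lines.getD n ""
    if PySem.Str.isIn "; MACHINE_END_GCODE_START" line then
      let cut : Nat := if decide (0 < n) && PySem.Str.isIn "; FEATURE: Custom" (lines.getD (n - 1) "") then n - 1 else n
      (lines.take cut, some (cut : Int))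
    else
      let m400' := if m400.isNone &&
          (PySem.Str.startswith (PySem.Str.lower (PySem.Str.strip line)) "m400" &&
           PySem.Str.isIn "wait for buffer" (PySem.Str.lower line)) then some n else m400
      pvLoopB lines n m400'

def strip_end_gcode_alt (lines : List String) : List String × Option Int :=
  pvLoopB lines lines.length none

-- ===== PRECONDITION & SPEC =====
def Spec_strip_end_gcode (lines : List String) (out : List String × Option Int) : Prop := out = strip_end_gcode_alt lines
instance (lines : List String) (out : List String × Option Int) : Decidable (Spec_strip_end_gcode lines out) := by unfold Spec_strip_end_gcode; infer_instance

-- ===== CLAIM (what is proved, stated in full; the proofs are below) =====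
def Claim_equal_strip_end_gcode : Prop := ∀ (lines : List String), Dom_strip_end_gcode lines → Spec_strip_end_gcode lines (strip_end_gcode lines)

-- ===== LEMMAS AND PROOFS =====
-- Invariant of B's single pass: it equals A's first loop, then the carried
-- fallback, then A's second loop, then the default.
theorem pvLoopB_eq (lines : List String) (n : Nat) (m400 : Option Nat) :
    pvLoopB lines n m400 =
      match pvLoopA1 lines n with
      | some r => r
      | none =>
        match m400 with
        | some j => (lines.take j, some (j : Int))
        | none =>
          match pvLoopA2 lines n with
          | some r => r
          | none => (lines, none) := by
  induction n generalizing m400 with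
  | zero => cases m400 <;> simp [pvLoopB, pvLoopA1, pvLoopA2]
  | succ n ih =>
    simp only [pvLoopB, pvLoopA1, pvLoopA2]
    by_cases h1 : PySem.Str.isIn "; MACHINE_END_GCODE_START" (lines.getD n "") = true
    · rw [if_pos h1, if_pos h1]
    · rw [if_neg h1, if_neg h1]
      cases m400 with
      | some j =>
        simp only [Option.isNone_some, Bool.false_and, Bool.false_eq_true, if_false, ih]
      | none =>
        simp only [Option.isNone_none, Bool.true_and]
        by_cases h2 : (PySem.Str.startswith (PySem.Str.lower (PySem.Str.strip (lines.getD n ""))) "m400" &&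
            PySem.Str.isIn "wait for buffer" (PySem.Str.lower (lines.getD n ""))) = true
        · rw [if_pos h2, if_pos h2, ih]
        · rw [if_neg h2, if_neg h2, ih]

-- ===== VERDICT (by name: the statement is the Claim_ definition above) =====
theorem strip_end_gcode_spec : Claim_equal_strip_end_gcode := by
  intro lines _
  unfold Spec_strip_end_gcode strip_end_gcode strip_end_gcode_alt
  rw [pvLoopB_eq]
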